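-- pv_equiv track=rewrite | github.com/edwardscc/lennys-podcast-transcripts | knowledge_base/examples/prompt_examples.py | find_relevant_episodes
-- ===== SOURCE A (Python) =====
-- def find_relevant_episodes(kb, topic, max_episodes=3):
--     """Find episodes relevant to a topic"""
--     topic_lower = topic.lower()
--     scored = []
--
--     for ep in kb['episodes']:
--         transcript_lower = ep['transcript'].lower()
--         # Simple keyword matching - in production, use embeddings
--         score = transcript_lower.count(topic_lower)
--         if score > 0:
--             scored.append((score, ep))
--
--     scored.sort(key=lambda x: x[0], reverse=True)
--     return [ep for _, ep in scored[:max_episodes]]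
-- ===== SOURCE B (Python) =====
-- def find_relevant_episodes(kb, topic, max_episodes=3):
--     """Find episodes relevant to a topic (partial selection instead of a full sort)"""
--     topic_lower = topic.lower()
--     scored = []
--     for ep in kb['episodes']:
--         score = ep['transcript'].lower().count(topic_lower)
--         if score > 0:
--             scored.append((score, ep))
--     result = []
--     while scored and len(result) < max_episodes:
--         best = scored[0]
--         for cand in scored[1:]:
--             if cand[0] > best[0]:
--                 best = cand
--         scored.remove(best)
--         result.append(best[1])
--     return result
-- ===== Notes on version B (the rewrite author's own statement) =====
-- stated objective: alternative
-- what changed: Replaces the full stable reverse sort plus slice by a partial selection loop that repeatedly extracts the earliest remaining episode with the maximum score until max_episodes are picked; Pre_ excludes only the inputs where A raises KeyError (no 'episodes' key or an episode without 'transcript').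
-- intended difference: When max_episodes is negative and more than |max_episodes| episodes mention the topic, A's scored[:max_episodes] wraps around and returns all but the last |max_episodes| ranked episodes (an accident of Python slicing); B returns the empty list, the intended result of asking for a non-positive number of episodes. — e.g. on find_relevant_episodes([("episodes", [[("transcript", "ai ai")], [("transcript", "ai")]])], "ai", -1): A returns [[("transcript", "ai ai")]], B returns []
import Mathlib
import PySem

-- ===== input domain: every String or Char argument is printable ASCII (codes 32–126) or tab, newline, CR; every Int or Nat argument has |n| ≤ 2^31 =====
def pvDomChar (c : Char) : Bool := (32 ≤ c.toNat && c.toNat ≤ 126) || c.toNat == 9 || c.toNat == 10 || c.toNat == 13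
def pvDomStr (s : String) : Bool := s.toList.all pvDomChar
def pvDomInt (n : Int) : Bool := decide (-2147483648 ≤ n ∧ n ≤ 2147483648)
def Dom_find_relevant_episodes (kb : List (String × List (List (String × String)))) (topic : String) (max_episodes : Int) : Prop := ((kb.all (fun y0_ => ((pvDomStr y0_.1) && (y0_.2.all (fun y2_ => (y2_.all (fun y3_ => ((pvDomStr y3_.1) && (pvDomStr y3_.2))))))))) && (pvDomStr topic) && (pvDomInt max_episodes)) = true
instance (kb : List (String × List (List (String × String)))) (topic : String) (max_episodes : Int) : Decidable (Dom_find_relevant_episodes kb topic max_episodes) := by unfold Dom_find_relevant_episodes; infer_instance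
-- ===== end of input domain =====

-- B replaces A's full stable reverse sort + slice by a partial selection loop that picks at
-- most max_episodes episodes; on negative max_episodes B returns [] where A's slice wraps.

-- first-match lookup in an association list (Python dict access d[k]; none = KeyError)
def pvGet? {ν : Type} (d : List (String × ν)) (k : String) : Option ν :=
  (d.find? (fun p => p.1 == k)).map (fun p => p.2)

-- ===== PORT A =====
def find_relevant_episodes (kb : List (String × List (List (String × String)))) (topic : String) (max_episodes : Int) : List (List (String × String)) :=
  let topic_lower := PySem.Str.lower topic
  let scored : List (Int × List (String × String)) :=
    ((pvGet? kb "episodes").getD []).foldl (fun acc ep =>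
      let transcript_lower := PySem.Str.lower ((pvGet? ep "transcript").getD "")
      let score : Int := (PySem.Str.count transcript_lower topic_lower : Int)
      if score > 0 then acc ++ [(score, ep)] else acc) []
  let scored_sorted := PySem.List.sorted scored (fun x => x.1) true
  (PySem.List.slice scored_sorted none (some max_episodes)).map (fun x => x.2)

-- ===== PORT B =====
-- the 'while scored and len(result) < max_episodes' selection loop of Source B, made total with
-- a fuel bound (each iteration removes one element, so scored.length iterations suffice);
-- k counts the remaining free slots, max_episodes - len(result)
def pvSelectGo (fuel : Nat) (scored : List (Int × List (String × String))) (k : Int) : List (List (String × String)) :=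
  match fuel, scored with
  | 0, _ => []
  | _ + 1, [] => []
  | fuel + 1, c :: cs =>
    if k ≤ 0 then []
    else
      let best := cs.foldl (fun b x => if b.1 < x.1 then x else b) c
      best.2 :: pvSelectGo fuel ((PySem.List.remove? (c :: cs) best).getD cs) (k - 1)

def pvSelect (scored : List (Int × List (String × String))) (k : Int) : List (List (String × String)) :=
  pvSelectGo scored.length scored k

def find_relevant_episodes_alt (kb : List (String × List (List (String × String)))) (topic : String) (max_episodes : Int) : List (List (String × String)) :=
  let topic_lower := PySem.Str.lower topic
  let scored : List (Int × List (String × String)) :=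
    ((pvGet? kb "episodes").getD []).foldl (fun acc ep =>
      let score : Int := (PySem.Str.count (PySem.Str.lower ((pvGet? ep "transcript").getD "")) topic_lower : Int)
      if score > 0 then acc ++ [(score, ep)] else acc) []
  pvSelect scored max_episodes

-- ===== PRECONDITION & SPEC =====
-- Pre_ excludes exactly the inputs where the Python raises KeyError: a kb without the
-- "episodes" key, or an episode dict without the "transcript" key.
def Pre_find_relevant_episodes (kb : List (String × List (List (String × String)))) (topic : String) (max_episodes : Int) : Prop :=
  (pvGet? kb "episodes").isSome = true ∧
  ∀ ep ∈ (pvGet? kb "episodes").getD [], (pvGet? ep "transcript").isSome = true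
instance (kb : List (String × List (List (String × String)))) (topic : String) (max_episodes : Int) : Decidable (Pre_find_relevant_episodes kb topic max_episodes) := by unfold Pre_find_relevant_episodes; infer_instance

def pvWitness_find_relevant_episodes : (List (String × List (List (String × String)))) × String × Int :=
  ([("episodes", [[("transcript", "ai and more AI"), ("title", "e1")], [("transcript", "nothing")], [("transcript", "ai")]])], "AI", 2)

-- When max_episodes is negative and more than |max_episodes| episodes mention the topic, A's
-- scored[:max_episodes] slice wraps around and returns all but the last |max_episodes| of the
-- ranked episodes, an accident of Python slicing; B returns [], the intended result of asking
-- for a non-positive number of episodes.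
def D_find_relevant_episodes (kb : List (String × List (List (String × String)))) (topic : String) (max_episodes : Int) : Prop :=
  max_episodes < 0 ∧
  (-max_episodes).toNat <
    ((pvGet? kb "episodes").getD []).countP
      (fun ep => decide ((0:Int) < (PySem.Str.count (PySem.Str.lower ((pvGet? ep "transcript").getD "")) (PySem.Str.lower topic) : Int)))
instance (kb : List (String × List (List (String × String)))) (topic : String) (max_episodes : Int) : Decidable (D_find_relevant_episodes kb topic max_episodes) := by unfold D_find_relevant_episodes; infer_instance

def Spec_find_relevant_episodes (kb : List (String × List (List (String × String)))) (topic : String) (max_episodes : Int) (out : List (List (String × String))) : Prop := ¬ D_find_relevant_episodes kb topic max_episodes → out = find_relevant_episodes_alt kb topic max_episodes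
instance (kb : List (String × List (List (String × String)))) (topic : String) (max_episodes : Int) (out : List (List (String × String))) : Decidable (Spec_find_relevant_episodes kb topic max_episodes out) := by unfold Spec_find_relevant_episodes; infer_instance

def pvDiffWitness_find_relevant_episodes : (List (String × List (List (String × String)))) × String × Int :=
  ([("episodes", [[("transcript", "ai ai")], [("transcript", "ai")]])], "ai", -1)

def pvDiffWitnessOut_find_relevant_episodes : (List (List (String × String))) × (List (List (String × String))) :=
  ([[("transcript", "ai ai")]], [])

-- ===== CLAIM (what is proved, stated in full; the proofs are below) =====
def Claim_unchanged_find_relevant_episodes : Prop := ∀ (kb : List (String × List (List (String × String)))) (topic : String) (max_episodes : Int), Dom_find_relevant_episodes kb topic max_episodes → Pre_find_relevant_episodes kb topic max_episodes → Spec_find_relevant_episodes kb topic max_episodes (find_relevant_episodes kb topic max_episodes)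
def Claim_changed_find_relevant_episodes : Prop := Dom_find_relevant_episodes (pvDiffWitness_find_relevant_episodes.1) (pvDiffWitness_find_relevant_episodes.2.1) (pvDiffWitness_find_relevant_episodes.2.2) ∧ Pre_find_relevant_episodes (pvDiffWitness_find_relevant_episodes.1) (pvDiffWitness_find_relevant_episodes.2.1) (pvDiffWitness_find_relevant_episodes.2.2) ∧ D_find_relevant_episodes (pvDiffWitness_find_relevant_episodes.1) (pvDiffWitness_find_relevant_episodes.2.1) (pvDiffWitness_find_relevant_episodes.2.2) ∧ find_relevant_episodes (pvDiffWitness_find_relevant_episodes.1) (pvDiffWitness_find_relevant_episodes.2.1) (pvDiffWitness_find_relevant_episodes.2.2) = pvDiffWitnessOut_find_relevant_episodes.1 ∧ find_relevant_episodes_alt (pvDiffWitness_find_relevant_episodes.1) (pvDiffWitness_find_relevant_episodes.2.1) (pvDiffWitness_find_relevant_episodes.2.2) = pvDiffWitnessOut_find_relevant_episodes.2 ∧ pvDiffWitnessOut_find_relevant_episodes.1 ≠ pvDiffWitnessOut_find_relevant_episodes.2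
def Claim_exact_find_relevant_episodes : Prop := ∀ (kb : List (String × List (List (String × String)))) (topic : String) (max_episodes : Int), Dom_find_relevant_episodes kb topic max_episodes → Pre_find_relevant_episodes kb topic max_episodes → D_find_relevant_episodes kb topic max_episodes → find_relevant_episodes kb topic max_episodes ≠ find_relevant_episodes_alt kb topic max_episodes

-- ===== LEMMAS AND PROOFS =====

-- one insertion step of the stable reverse sort, taken off the right end of the input
theorem pvSortedRev_concat (l : List (Int × List (String × String))) (x : Int × List (String × String)) :
    PySem.List.sorted (l ++ [x]) (fun y => y.1) true
      = PySem.List.insertBy (fun a b => decide (b.1 < a.1)) x (PySem.List.sorted l (fun y => y.1) true) := by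
  rw [PySem.List.sorted_rev_eq_foldl_insertBy, PySem.List.sorted_rev_eq_foldl_insertBy, List.foldl_append]
  rfl

theorem pvBest_mem (c : Int × List (String × String)) (cs : List (Int × List (String × String))) :
    cs.foldl (fun b x => if b.1 < x.1 then x else b) c ∈ c :: cs := by
  induction cs generalizing c with
  | nil => simp
  | cons d ds ih =>
    simp only [List.foldl_cons]
    split_ifs with h
    · exact List.mem_cons_of_mem c (ih d)
    · rcases List.mem_cons.mp (ih c) with h' | h'
      · rw [h']
        exact List.mem_cons_self
      · exact List.mem_cons_of_mem c (List.mem_cons_of_mem d h')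

theorem pvBest_le (c : Int × List (String × String)) (cs : List (Int × List (String × String))) :
    ∀ y ∈ c :: cs, y.1 ≤ (cs.foldl (fun b x => if b.1 < x.1 then x else b) c).1 := by
  induction cs generalizing c with
  | nil => simp
  | cons d ds ih =>
    intro y hy
    simp only [List.foldl_cons]
    split_ifs with h
    · rcases List.mem_cons.mp hy with rfl | hy'
      · exact le_trans (le_of_lt h) (ih d d List.mem_cons_self)
      · exact ih d y hy'
    · rcases List.mem_cons.mp hy with rfl | hy'
      · exact ih y y List.mem_cons_self
      · rcases List.mem_cons.mp hy' with rfl | hy''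
        · exact le_trans (not_lt.mp h) (ih c c List.mem_cons_self)
        · exact ih c y (List.mem_cons.mpr (Or.inr hy''))

-- the head of the stable reverse sort is the first maximal element, and its tail is the
-- reverse sort of the list with that occurrence erased
theorem pvHead (c : Int × List (String × String)) (cs : List (Int × List (String × String))) :
    PySem.List.sorted (c :: cs) (fun y => y.1) true
      = (cs.foldl (fun b x => if b.1 < x.1 then x else b) c)
          :: PySem.List.sorted ((c :: cs).erase (cs.foldl (fun b x => if b.1 < x.1 then x else b) c)) (fun y => y.1) true := by
  induction cs using List.reverseRecOn with
  | nil => simp [PySem.List.sorted, PySem.List.insertBy]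
  | append_singleton ds x ih =>
    rw [List.foldl_append, List.foldl_cons, List.foldl_nil]
    rw [show c :: (ds ++ [x]) = (c :: ds) ++ [x] from rfl, pvSortedRev_concat, ih]
    set B := ds.foldl (fun b x => if b.1 < x.1 then x else b) c with hB
    by_cases h : B.1 < x.1
    · have hnm : x ∉ c :: ds := by
        intro hmem
        have hle := pvBest_le c ds x hmem
        rw [← hB] at hle
        omega
      rw [if_pos h, List.erase_append_right _ hnm]
      simp only [List.erase_cons_head, List.append_nil]
      rw [show PySem.List.insertBy (fun a b => decide (b.1 < a.1)) x
            (B :: PySem.List.sorted ((c :: ds).erase B) (fun y => y.1) true)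
          = if (decide (B.1 < x.1)) = true then x :: B :: PySem.List.sorted ((c :: ds).erase B) (fun y => y.1) true
            else B :: PySem.List.insertBy (fun a b => decide (b.1 < a.1)) x (PySem.List.sorted ((c :: ds).erase B) (fun y => y.1) true) from rfl]
      rw [if_pos (decide_eq_true h), ← ih]
    · have hm : B ∈ c :: ds := pvBest_mem c ds
      rw [if_neg h, List.erase_append_left _ hm]
      rw [show PySem.List.insertBy (fun a b => decide (b.1 < a.1)) x
            (B :: PySem.List.sorted ((c :: ds).erase B) (fun y => y.1) true)
          = if (decide (B.1 < x.1)) = true then x :: B :: PySem.List.sorted ((c :: ds).erase B) (fun y => y.1) true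
            else B :: PySem.List.insertBy (fun a b => decide (b.1 < a.1)) x (PySem.List.sorted ((c :: ds).erase B) (fun y => y.1) true) from rfl]
      rw [if_neg (by simpa using h), pvSortedRev_concat]

-- selection = take after stable reverse sort
theorem pvMainGo : ∀ (n : Nat) (l : List (Int × List (String × String))) (k : Int), l.length ≤ n →
    pvSelectGo n l k = ((PySem.List.sorted l (fun y => y.1) true).map (fun y => y.2)).take k.toNat := by
  intro n
  induction n with
  | zero =>
    intro l k hl
    have : l = [] := List.eq_nil_of_length_eq_zero (Nat.le_zero.mp hl)
    subst this
    simp [pvSelectGo, PySem.List.sorted]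
  | succ n ih =>
    intro l k hl
    match l with
    | [] => simp [pvSelectGo, PySem.List.sorted]
    | c :: cs =>
      by_cases hk : k ≤ 0
      · rw [pvSelectGo]
        simp [hk, Int.toNat_of_nonpos hk]
      · rw [pvSelectGo]
        simp only [hk, if_false]
        set B := cs.foldl (fun b x => if b.1 < x.1 then x else b) c with hB
        have hm : B ∈ c :: cs := pvBest_mem c cs
        rw [PySem.List.remove?_eq_some_erase _ B hm]
        have hlen : ((c :: cs).erase B).length ≤ n := by
          rw [List.length_erase_of_mem hm]
          simp only [List.length_cons] at hl ⊢
          omega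
        rw [Option.getD_some, ih _ (k - 1) hlen, pvHead c cs, ← hB]
        have hkn : k.toNat = (k - 1).toNat + 1 := by omega
        rw [hkn]
        simp

theorem pvMain (l : List (Int × List (String × String))) (k : Int) :
    pvSelect l k = ((PySem.List.sorted l (fun y => y.1) true).map (fun y => y.2)).take k.toNat :=
  pvMainGo l.length l k le_rfl

theorem pvSelect_nonpos (l : List (Int × List (String × String))) (k : Int) (hk : k ≤ 0) :
    pvSelect l k = [] := by
  cases l with
  | nil => simp [pvSelect, pvSelectGo]
  | cons c cs => simp [pvSelect, pvSelectGo, hk]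

-- the scored list's length is the count of matching episodes (the quantity D_ talks about)
theorem pvScoredLen (p : List (String × String) → Int) :
    ∀ (eps : List (List (String × String))) (acc : List (Int × List (String × String))),
    (eps.foldl (fun acc ep => if p ep > 0 then acc ++ [(p ep, ep)] else acc) acc).length
      = acc.length + eps.countP (fun ep => decide ((0:Int) < p ep)) := by
  intro eps
  induction eps with
  | nil => simp
  | cons e es ih =>
    intro acc
    simp only [List.foldl_cons, List.countP_cons]
    by_cases h : p e > 0
    · rw [if_pos h, ih]
      simp [h]
      omega
    · rw [if_neg h, ih]
      simp [h]

-- ===== VERDICT (by name: the statement is the Claim_ definition above) =====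
theorem find_relevant_episodes_spec : Claim_unchanged_find_relevant_episodes := by
  intro kb topic max_episodes _ _ hnD
  show find_relevant_episodes kb topic max_episodes = find_relevant_episodes_alt kb topic max_episodes
  simp only [find_relevant_episodes, find_relevant_episodes_alt]
  by_cases hm : 0 ≤ max_episodes
  · rw [PySem.List.slice_to _ hm, List.map_take,
        pvMain _ max_episodes]
  · unfold D_find_relevant_episodes at hnD
    push Not at hnD
    have hcnt := hnD (by omega)
    rw [pvSelect_nonpos _ _ (by omega)]
    have hk : max_episodes = -(((-max_episodes).toNat : Nat) : Int) := by omega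
    have hpos : 0 < (-max_episodes).toNat := by omega
    rw [hk, PySem.List.slice_to_neg_natCast _ _ hpos]
    have hlen := pvScoredLen
      (fun ep => (PySem.Str.count (PySem.Str.lower ((pvGet? ep "transcript").getD "")) (PySem.Str.lower topic) : Int))
      ((pvGet? kb "episodes").getD []) []
    simp only [List.length_nil, Nat.zero_add] at hlen
    have h0 : (PySem.List.sorted (((pvGet? kb "episodes").getD []).foldl (fun acc ep =>
        if (PySem.Str.count (PySem.Str.lower ((pvGet? ep "transcript").getD "")) (PySem.Str.lower topic) : Int) > 0
        then acc ++ [((PySem.Str.count (PySem.Str.lower ((pvGet? ep "transcript").getD "")) (PySem.Str.lower topic) : Int), ep)]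
        else acc) []) (fun x => x.1) true).length - (-max_episodes).toNat = 0 := by
      rw [PySem.List.length_sorted, hlen]
      omega
    rw [h0]
    simp

theorem find_relevant_episodes_changed : Claim_changed_find_relevant_episodes := by
  unfold Claim_changed_find_relevant_episodes; decide

theorem find_relevant_episodes_tight : Claim_exact_find_relevant_episodes := by
  intro kb topic max_episodes _ _ hD
  obtain ⟨hmneg, hcnt⟩ := hD
  simp only [find_relevant_episodes, find_relevant_episodes_alt]
  rw [pvSelect_nonpos _ _ (by omega)]
  have hk : max_episodes = -(((-max_episodes).toNat : Nat) : Int) := by omega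
  have hpos : 0 < (-max_episodes).toNat := by omega
  rw [hk, PySem.List.slice_to_neg_natCast _ _ hpos]
  intro hcontra
  have hlen := pvScoredLen
    (fun ep => (PySem.Str.count (PySem.Str.lower ((pvGet? ep "transcript").getD "")) (PySem.Str.lower topic) : Int))
    ((pvGet? kb "episodes").getD []) []
  simp only [List.length_nil, Nat.zero_add] at hlen
  have hmap := congrArg List.length hcontra
  simp only [List.length_map, List.length_take, PySem.List.length_sorted, List.length_nil, hlen] at hmap
  omega
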